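-- pv_equiv track=rewrite | github.com/ChenyuL/RWE_LLM_validator | run_li_paper_analysis_rag.py | outputs_agree
-- ===== SOURCE A (Python) =====
-- def outputs_agree(output1, output2):
--     # Simple string comparison for now
--     # Could be enhanced with semantic similarity or other NLP techniques
--     if not output1 or not output2:
--         return False
--
--     # Check for exact match
--     if output1 == output2:
--         return True
--
--     # Check for 'unknown' or similar values
--     unknown_patterns = ['unknown', 'not enough information', 'cannot determine']
--     if any(pattern in output1.lower() for pattern in unknown_patterns) and \
--        any(pattern in output2.lower() for pattern in unknown_patterns):
--         return True
--
--     # Check for yes/no agreement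
--     yes_patterns = ['yes', 'complies', 'compliant', 'fulfilled']
--     no_patterns = ['no', 'does not comply', 'non-compliant', 'not fulfilled']
--
--     output1_yes = any(pattern in output1.lower() for pattern in yes_patterns)
--     output1_no = any(pattern in output1.lower() for pattern in no_patterns)
--     output2_yes = any(pattern in output2.lower() for pattern in yes_patterns)
--     output2_no = any(pattern in output2.lower() for pattern in no_patterns)
--
--     if (output1_yes and output2_yes) or (output1_no and output2_no):
--         return True
--
--     return False
-- ===== SOURCE B (Python) =====
-- _GROUPS = (
--     (1, ('unknown', 'not enough information', 'cannot determine')),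
--     (2, ('yes', 'complies', 'compliant', 'fulfilled')),
--     (4, ('no', 'does not comply', 'non-compliant', 'not fulfilled')),
-- )
--
-- def _tag_mask(s):
--     # single left-to-right scan: at each position try every pattern as a prefix,
--     # accumulating a 3-bit category mask; stop early once all bits are set
--     low = s.lower()
--     mask = 0
--     for i in range(len(low)):
--         if mask == 7:
--             break
--         for bit, pats in _GROUPS:
--             if any(low.startswith(p, i) for p in pats):
--                 mask |= bit
--     return mask
--
-- def outputs_agree(output1, output2):
--     if not output1 or not output2:
--         return False
--     if output1 == output2:
--         return True
--     return (_tag_mask(output1) & _tag_mask(output2)) != 0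
-- ===== Notes on version B (the rewrite author's own statement) =====
-- stated objective: alternative
-- what changed: Instead of running a library substring test per pattern per category, B makes one left-to-right scan over each lowered string, testing every pattern as a prefix at each position and accumulating a 3-bit category mask with early exit, and decides agreement as a nonzero bitwise AND of the two masks.
import Mathlib
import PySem

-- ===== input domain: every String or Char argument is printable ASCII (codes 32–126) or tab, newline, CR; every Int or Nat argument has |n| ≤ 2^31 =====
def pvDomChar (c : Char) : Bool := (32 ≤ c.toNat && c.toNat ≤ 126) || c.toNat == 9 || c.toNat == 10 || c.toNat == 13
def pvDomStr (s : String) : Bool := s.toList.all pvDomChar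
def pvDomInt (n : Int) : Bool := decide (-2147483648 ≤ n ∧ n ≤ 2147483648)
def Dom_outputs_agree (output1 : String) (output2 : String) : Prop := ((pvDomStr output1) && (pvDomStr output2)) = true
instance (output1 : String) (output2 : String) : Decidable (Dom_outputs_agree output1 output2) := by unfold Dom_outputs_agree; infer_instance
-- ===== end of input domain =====

-- B replaces A's per-pattern substring tests with one left-to-right prefix scan per string
-- accumulating a 3-bit category mask (early exit), agreeing iff the masks' bitwise AND is nonzero.

-- ===== PORT A =====
def outputs_agree (output1 : String) (output2 : String) : Bool :=
  if output1 = "" || output2 = "" then false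
  else if output1 = output2 then true
  else
    let unknown_patterns := ["unknown", "not enough information", "cannot determine"]
    if (unknown_patterns.any fun p => PySem.Str.isIn p (PySem.Str.lower output1)) &&
       (unknown_patterns.any fun p => PySem.Str.isIn p (PySem.Str.lower output2)) then true
    else
      let yes_patterns := ["yes", "complies", "compliant", "fulfilled"]
      let no_patterns := ["no", "does not comply", "non-compliant", "not fulfilled"]
      let output1_yes := yes_patterns.any fun p => PySem.Str.isIn p (PySem.Str.lower output1)
      let output1_no := no_patterns.any fun p => PySem.Str.isIn p (PySem.Str.lower output1)
      let output2_yes := yes_patterns.any fun p => PySem.Str.isIn p (PySem.Str.lower output2)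
      let output2_no := no_patterns.any fun p => PySem.Str.isIn p (PySem.Str.lower output2)
      if (output1_yes && output2_yes) || (output1_no && output2_no) then true
      else false

-- ===== PORT B =====
def pvGroups : List (Nat × List String) :=
  [(1, ["unknown", "not enough information", "cannot determine"]),
   (2, ["yes", "complies", "compliant", "fulfilled"]),
   (4, ["no", "does not comply", "non-compliant", "not fulfilled"])]

-- the scan over positions i of `low` becomes structural recursion on the suffix low[i:]
-- (low.startswith(p, i) is exactly a prefix test on that suffix)
def pvScanGo (mask : Nat) (suff : List Char) : Nat :=
  match suff with
  | [] => mask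
  | _ :: rest =>
    if mask == 7 then mask
    else
      let m := pvGroups.foldl
        (fun m bp => if bp.2.any (fun p => p.toList.isPrefixOf suff) then m ||| bp.1 else m) mask
      pvScanGo m rest

def pvTagMask (s : String) : Nat :=
  pvScanGo 0 (PySem.Str.lower s).toList

def outputs_agree_alt (output1 : String) (output2 : String) : Bool :=
  if output1 = "" || output2 = "" then false
  else if output1 = output2 then true
  else !(pvTagMask output1 &&& pvTagMask output2 == 0)

-- ===== PRECONDITION & SPEC =====
def Spec_outputs_agree (output1 : String) (output2 : String) (out : Bool) : Prop := out = outputs_agree_alt output1 output2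
instance (output1 : String) (output2 : String) (out : Bool) : Decidable (Spec_outputs_agree output1 output2 out) := by unfold Spec_outputs_agree; infer_instance

-- ===== CLAIM (what is proved, stated in full; the proofs are below) =====
def Claim_equal_outputs_agree : Prop := ∀ (output1 : String) (output2 : String), Dom_outputs_agree output1 output2 → Spec_outputs_agree output1 output2 (outputs_agree output1 output2)

-- ===== LEMMAS AND PROOFS =====

def pvU : List String := ["unknown", "not enough information", "cannot determine"]
def pvY : List String := ["yes", "complies", "compliant", "fulfilled"]
def pvN : List String := ["no", "does not comply", "non-compliant", "not fulfilled"]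

def pvAnyIn (pats : List String) (l : List Char) : Bool :=
  pats.any fun p => PySem.Chars.isIn p.toList l

def pvAnyPre (pats : List String) (l : List Char) : Bool :=
  pats.any fun p => p.toList.isPrefixOf l

def pvBits (l : List Char) : Nat :=
  (if pvAnyIn pvU l then 1 else 0) ||| (if pvAnyIn pvY l then 2 else 0) |||
  (if pvAnyIn pvN l then 4 else 0)

theorem pvAnyIn_cons (pats : List String) (c : Char) (l : List Char) :
    pvAnyIn pats (c :: l) = (pvAnyPre pats (c :: l) || pvAnyIn pats l) := by
  unfold pvAnyIn pvAnyPre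
  rw [Bool.eq_iff_iff]
  simp only [List.any_eq_true, Bool.or_eq_true, PySem.Chars.isIn_iff_infix,
    List.infix_cons_iff, List.isPrefixOf_iff_prefix]
  constructor
  · rintro ⟨p, hp, h | h⟩
    · exact Or.inl ⟨p, hp, h⟩
    · exact Or.inr ⟨p, hp, h⟩
  · rintro (⟨p, hp, h⟩ | ⟨p, hp, h⟩)
    · exact ⟨p, hp, Or.inl h⟩
    · exact ⟨p, hp, Or.inr h⟩

theorem pvBits_lt (l : List Char) : pvBits l < 8 := by
  unfold pvBits
  rcases pvAnyIn pvU l <;> rcases pvAnyIn pvY l <;> rcases pvAnyIn pvN l <;> decide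

theorem pvStep (mask : Nat) (suff : List Char) :
    pvGroups.foldl
      (fun m bp => if bp.2.any (fun p => p.toList.isPrefixOf suff) then m ||| bp.1 else m) mask
    = mask ||| ((if pvAnyPre pvU suff then 1 else 0) ||| (if pvAnyPre pvY suff then 2 else 0) |||
        (if pvAnyPre pvN suff then 4 else 0)) := by
  rcases hU : pvAnyPre pvU suff <;> rcases hY : pvAnyPre pvY suff <;>
    rcases hN : pvAnyPre pvN suff <;>
    simp only [pvAnyPre, pvU, pvY, pvN] at hU hY hN <;>
    simp only [pvGroups, List.foldl] <;>
    rw [hU, hY, hN] <;> simp [Nat.or_assoc]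

theorem pvScanGo_eq (suff : List Char) : ∀ mask : Nat, mask < 8 →
    pvScanGo mask suff = mask ||| pvBits suff := by
  induction suff with
  | nil =>
    intro mask _
    have h0 : pvBits [] = 0 := by decide
    simp [pvScanGo, h0]
  | cons c rest ih =>
    intro mask hm
    rw [pvScanGo]
    have hbits : pvBits (c :: rest) =
        ((if pvAnyPre pvU (c :: rest) then 1 else 0) ||| (if pvAnyPre pvY (c :: rest) then 2 else 0) |||
          (if pvAnyPre pvN (c :: rest) then 4 else 0)) ||| pvBits rest := by
      unfold pvBits
      rw [pvAnyIn_cons, pvAnyIn_cons, pvAnyIn_cons]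
      rcases pvAnyPre pvU (c :: rest) <;> rcases pvAnyPre pvY (c :: rest) <;>
        rcases pvAnyPre pvN (c :: rest) <;>
        rcases pvAnyIn pvU rest <;> rcases pvAnyIn pvY rest <;> rcases pvAnyIn pvN rest <;>
        simp
    rcases h7 : (mask == 7 : Bool)
    · simp only [Bool.false_eq_true, if_false]
      rw [pvStep]
      have hhd : ((if pvAnyPre pvU (c :: rest) then 1 else 0) |||
          (if pvAnyPre pvY (c :: rest) then 2 else 0) |||
          (if pvAnyPre pvN (c :: rest) then 4 else 0)) < 8 := by
        rcases pvAnyPre pvU (c :: rest) <;> rcases pvAnyPre pvY (c :: rest) <;>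
          rcases pvAnyPre pvN (c :: rest) <;> decide
      rw [ih _ (Nat.or_lt_two_pow (n := 3) hm hhd)]
      rw [hbits, Nat.or_assoc]
    · have : mask = 7 := by simpa using h7
      subst this
      rw [if_pos rfl]
      rw [hbits]
      have h1 := pvBits_lt rest
      have hhd : ((if pvAnyPre pvU (c :: rest) then 1 else 0) |||
          (if pvAnyPre pvY (c :: rest) then 2 else 0) |||
          (if pvAnyPre pvN (c :: rest) then 4 else 0)) < 8 := by
        rcases pvAnyPre pvU (c :: rest) <;> rcases pvAnyPre pvY (c :: rest) <;>
          rcases pvAnyPre pvN (c :: rest) <;> decide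
      have h2 : (((if pvAnyPre pvU (c :: rest) then 1 else 0) |||
          (if pvAnyPre pvY (c :: rest) then 2 else 0) |||
          (if pvAnyPre pvN (c :: rest) then 4 else 0)) ||| pvBits rest) < 8 :=
        Nat.or_lt_two_pow (n := 3) hhd h1
      generalize (((if pvAnyPre pvU (c :: rest) then 1 else 0) |||
          (if pvAnyPre pvY (c :: rest) then 2 else 0) |||
          (if pvAnyPre pvN (c :: rest) then 4 else 0)) ||| pvBits rest) = b at h2 ⊢
      interval_cases b <;> rfl

theorem pvTagMask_eq (s : String) :
    pvTagMask s = pvBits (PySem.Str.lower s).toList := by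
  unfold pvTagMask
  rw [pvScanGo_eq _ 0 (by decide)]
  simp

def pvA1 (s : String) : Bool := pvU.any fun p => PySem.Str.isIn p (PySem.Str.lower s)
def pvA2 (s : String) : Bool := pvY.any fun p => PySem.Str.isIn p (PySem.Str.lower s)
def pvA3 (s : String) : Bool := pvN.any fun p => PySem.Str.isIn p (PySem.Str.lower s)

theorem pvBits_lower (s : String) :
    pvBits (PySem.Str.lower s).toList =
      ((if pvA1 s then 1 else 0) ||| (if pvA2 s then 2 else 0) ||| (if pvA3 s then 4 else 0)) := by
  unfold pvBits pvAnyIn pvA1 pvA2 pvA3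
  simp [PySem.Str.isIn_eq]

theorem pvA_char (o1 o2 : String) (h1 : ¬ o1 = "") (h2 : ¬ o2 = "") (he : ¬ o1 = o2) :
    outputs_agree o1 o2 =
      (if pvA1 o1 && pvA1 o2 then true
       else if (pvA2 o1 && pvA2 o2) || (pvA3 o1 && pvA3 o2) then true else false) := by
  unfold outputs_agree pvA1 pvA2 pvA3 pvU pvY pvN
  simp only [h1, h2, he, Bool.or_self, decide_false, Bool.false_eq_true, if_false]

theorem pvFinal (u1 y1 n1 u2 y2 n2 : Bool) :
    (if u1 && u2 then true else if (y1 && y2) || (n1 && n2) then true else false)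
    = !((((if u1 then 1 else 0) ||| (if y1 then 2 else 0) ||| (if n1 then 4 else 0) : Nat) &&&
        ((if u2 then 1 else 0) ||| (if y2 then 2 else 0) ||| (if n2 then 4 else 0))) == 0) := by
  rcases u1 <;> rcases y1 <;> rcases n1 <;> rcases u2 <;> rcases y2 <;> rcases n2 <;> decide

-- ===== VERDICT (by name: the statement is the Claim_ definition above) =====
theorem outputs_agree_spec : Claim_equal_outputs_agree := by
  intro o1 o2 _
  unfold Spec_outputs_agree
  by_cases h1 : o1 = ""
  · simp [outputs_agree, outputs_agree_alt, h1]
  · by_cases h2 : o2 = ""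
    · simp [outputs_agree, outputs_agree_alt, h2]
    · by_cases he : o1 = o2
      · simp [outputs_agree, outputs_agree_alt, he, h2]
      · rw [pvA_char o1 o2 h1 h2 he]
        unfold outputs_agree_alt
        simp only [h1, h2, he, Bool.or_self, decide_false, if_false]
        rw [pvTagMask_eq o1, pvTagMask_eq o2, pvBits_lower o1, pvBits_lower o2]
        exact pvFinal (pvA1 o1) (pvA2 o1) (pvA3 o1) (pvA1 o2) (pvA2 o2) (pvA3 o2)
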